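-- pv_equiv track=rewrite | github.com/Aayushbankar/cryptopgraphic_algo | hill_Cipher_3x3.py | _matrix_distributor
-- ===== SOURCE A (Python) =====
-- def _matrix_distributor(text, k):
--     """
--     Converts text into a list of k-length vectors (list of lists of integers).
--     Pads with 'X' if necessary.
--     """
--     lstl = []
--
--     # 1. Pad the text if its length is not a multiple of k
--     if len(text) % k != 0:
--         padding_len = k - (len(text) % k)
--         # Pad with 'X'
--         text += 'X' * padding_len
--
--     # 2. Convert and chunk the text
--     for i in range(0, len(text), k):
--         sub = text[i:i+k]
--         lst = [ord(char) - ord("A") for char in sub]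
--         lstl.append(lst)
--
--     return lstl
-- ===== SOURCE B (Python) =====
-- def _matrix_distributor(text, k):
--     # Single left-to-right pass with an accumulator: grow the current row one
--     # character at a time and flush it when it reaches length k (instead of
--     # A's staged range/slice loop over k-sized substrings).
--     if len(text) % k != 0:
--         text += 'X' * (k - (len(text) % k))
--     rows = []
--     cur = []
--     for ch in text:
--         cur.append(ord(ch) - ord('A'))
--         if len(cur) == k:
--             rows.append(cur)
--             cur = []
--     return rows
-- ===== Notes on version B (the rewrite author's own statement) =====
-- stated objective: alternative
-- what changed: A iterates over chunk start indices range(0,len,k) and slices+converts a k-char substring per step; B makes a single character-by-character pass with an accumulator row that is flushed into the result whenever it reaches length k, with no index arithmetic or slicing.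
-- outside the precondition, e.g. on _matrix_distributor('AB', 0): A raises ZeroDivisionError, B raises ZeroDivisionError
import Mathlib
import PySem

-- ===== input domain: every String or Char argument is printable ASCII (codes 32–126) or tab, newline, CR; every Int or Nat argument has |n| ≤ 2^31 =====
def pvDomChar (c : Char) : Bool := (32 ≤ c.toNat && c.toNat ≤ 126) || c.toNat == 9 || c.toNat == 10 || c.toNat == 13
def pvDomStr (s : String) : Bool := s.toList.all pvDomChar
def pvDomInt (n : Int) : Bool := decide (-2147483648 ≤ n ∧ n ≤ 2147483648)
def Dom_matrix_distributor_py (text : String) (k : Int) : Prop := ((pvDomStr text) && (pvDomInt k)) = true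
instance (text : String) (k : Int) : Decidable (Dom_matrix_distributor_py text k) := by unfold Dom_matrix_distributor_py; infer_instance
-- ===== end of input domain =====

-- B replaces A's range/slice chunking loop by a single character-by-character pass
-- with an accumulator row flushed each time it reaches length k (objective: alternative).


-- ===== PORT A =====
-- literal transliteration of A: pad with 'X' ('X' * negative = '' — .toNat clamps, exact),
-- then one loop over range(0, len, k) that slices a k-char chunk and converts it.
def matrix_distributor_py (text : String) (k : Int) : List (List Int) :=
  let cs := text.toList
  let cs :=
    if PySem.Int.mod (cs.length : Int) k ≠ 0 then
      cs ++ List.replicate (k - PySem.Int.mod (cs.length : Int) k).toNat 'X'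
    else cs
  (PySem.List.pyRange 0 (cs.length : Int) k).foldl
    (fun lstl i =>
      lstl ++ [(PySem.List.slice cs (some i) (some (i + k))).map
                 (fun ch => (ch.toNat : Int) - 65)]) []

-- ===== PORT B =====
-- literal transliteration of B: same padding, then ONE pass over the characters
-- with state (rows, cur): cur grows by one converted char each step and is
-- flushed into rows whenever its length reaches k.
def matrix_distributor_py_alt (text : String) (k : Int) : List (List Int) :=
  let cs := text.toList
  let cs :=
    if PySem.Int.mod (cs.length : Int) k ≠ 0 then
      cs ++ List.replicate (k - PySem.Int.mod (cs.length : Int) k).toNat 'X'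
    else cs
  let st := cs.foldl
    (fun (st : List (List Int) × List Int) ch =>
      let cur := st.2 ++ [(ch.toNat : Int) - 65]
      if (cur.length : Int) = k then (st.1 ++ [cur], []) else (st.1, cur))
    ([], [])
  st.1

-- ===== PRECONDITION & SPEC =====
-- Pre_ excludes exactly k = 0, where Python's 'len(text) % k' raises ZeroDivisionError.
def Pre_matrix_distributor_py (text : String) (k : Int) : Prop := k ≠ 0
instance (text : String) (k : Int) : Decidable (Pre_matrix_distributor_py text k) := by unfold Pre_matrix_distributor_py; infer_instance
def pvWitness_matrix_distributor_py : String × Int := ("HELLO", 3)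
def Spec_matrix_distributor_py (text : String) (k : Int) (out : List (List Int)) : Prop := out = matrix_distributor_py_alt text k
instance (text : String) (k : Int) (out : List (List Int)) : Decidable (Spec_matrix_distributor_py text k out) := by unfold Spec_matrix_distributor_py; infer_instance

-- ===== CLAIM =====
def Claim_equal_matrix_distributor_py : Prop := ∀ (text : String) (k : Int), Dom_matrix_distributor_py text k → Pre_matrix_distributor_py text k → Spec_matrix_distributor_py text k (matrix_distributor_py text k)

-- ===== LEMMAS AND PROOFS =====

-- char → integer conversion shared by both ports
def pvConv (ch : Char) : Int := (ch.toNat : Int) - 65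

-- reference chunking: m chunks of K elements, front to back
def pvChunk (K : Nat) : Nat → List Int → List (List Int)
  | 0, _ => []
  | m + 1, xs => xs.take K :: pvChunk K m (xs.drop K)

-- B's step function (over already-converted integers)
def pvStep (k : Int) (st : List (List Int) × List Int) (x : Int) : List (List Int) × List Int :=
  if ((st.2 ++ [x]).length : Int) = k then (st.1 ++ [st.2 ++ [x]], []) else (st.1, st.2 ++ [x])

-- A's map over chunk start indexes is the reference chunking
theorem pvChunk_of_map (K : Nat) : ∀ (m : Nat) (xs : List Int),
    (List.range m).map (fun j => (xs.drop (K * j)).take K) = pvChunk K m xs := by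
  intro m
  induction m with
  | zero => intro xs; simp [pvChunk]
  | succ m ih =>
    intro xs
    rw [List.range_succ_eq_map, List.map_cons, List.map_map]
    simp only [Nat.mul_zero, List.drop_zero, pvChunk]
    congr 1
    rw [← ih (xs.drop K)]
    apply List.map_congr_left
    intro j _
    simp [Function.comp, List.drop_drop, Nat.mul_succ, Nat.add_comm]

-- filling one row: if cur plus the remaining ys exactly reach length k, the fold
-- flushes exactly one row cur ++ ys
theorem pvFill (k : Int) : ∀ (ys : List Int) (cur : List Int) (rows : List (List Int)),
    ys ≠ [] → (cur.length : Int) + ys.length = k →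
    ys.foldl (pvStep k) (rows, cur) = (rows ++ [cur ++ ys], []) := by
  intro ys
  induction ys with
  | nil => intro _ _ h _; exact absurd rfl h
  | cons y rest ih =>
    intro cur rows _ hlen
    rw [List.foldl_cons]
    by_cases hrest : rest = []
    · subst hrest
      simp only [List.length_cons, List.length_nil] at hlen
      simp only [List.foldl_nil, pvStep]
      rw [if_pos (by
        simp only [List.length_append, List.length_cons, List.length_nil]
        push_cast at hlen ⊢; omega)]
    · have hr : 0 < rest.length := List.length_pos_iff.mpr hrest
      simp only [List.length_cons] at hlen
      have hstep : pvStep k (rows, cur) y = (rows, cur ++ [y]) := by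
        simp only [pvStep]
        rw [if_neg (by
          simp only [List.length_append, List.length_cons, List.length_nil]
          push_cast at hlen ⊢; omega)]
      rw [hstep, ih (cur ++ [y]) rows hrest (by
        simp only [List.length_append, List.length_cons, List.length_nil]
        push_cast at hlen ⊢; omega)]
      simp

-- B's fold over a list of length m*K produces exactly the m reference chunks
theorem pvB_main (k : Int) (hk : 0 < k) : ∀ (m : Nat) (xs : List Int) (rows : List (List Int)),
    xs.length = m * k.toNat →
    (xs.foldl (pvStep k) (rows, [])).1 = rows ++ pvChunk k.toNat m xs := by
  intro m
  induction m with
  | zero =>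
    intro xs rows h
    have hx : xs = [] := List.eq_nil_of_length_eq_zero (by omega)
    subst hx
    simp [pvChunk]
  | succ m ih =>
    intro xs rows h
    have hK : 0 < k.toNat := by omega
    have hxs : k.toNat ≤ xs.length := by
      rw [h]
      calc k.toNat = 1 * k.toNat := (one_mul _).symm
        _ ≤ (m + 1) * k.toNat := Nat.mul_le_mul_right _ (by omega)
    have hsplit : xs = xs.take k.toNat ++ xs.drop k.toNat := (List.take_append_drop _ _).symm
    rw [hsplit, List.foldl_append]
    rw [pvFill k (xs.take k.toNat) [] rows
      (by
        intro hnil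
        have h2 := congrArg List.length hnil
        rw [List.length_take] at h2
        simp only [List.length_nil] at h2
        omega)
      (by
        simp only [List.length_nil, List.length_take]
        push_cast
        omega)]
    rw [ih (xs.drop k.toNat) (rows ++ [[] ++ xs.take k.toNat])
      (by rw [List.length_drop, h, Nat.succ_mul]; omega)]
    simp [pvChunk, ← hsplit]

-- with a negative step the flush condition never fires: rows never changes
theorem pvB_neg (k : Int) (hk : k < 0) : ∀ (xs : List Int) (rows : List (List Int)) (cur : List Int),
    (xs.foldl (pvStep k) (rows, cur)).1 = rows := by
  intro xs
  induction xs with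
  | nil => intro rows cur; rfl
  | cons x rest ih =>
    intro rows cur
    rw [List.foldl_cons]
    have : pvStep k (rows, cur) x = (rows, cur ++ [x]) := by
      simp only [pvStep]
      rw [if_neg (by simp; omega)]
    rw [this, ih]

-- pyRange with positive step k over 0..m*k is exactly the m chunk starts
theorem pvRange_chunks (k : Int) (hk : 0 < k) (m : Nat) :
    PySem.List.pyRange 0 ((m * k.toNat : Nat) : Int) k
      = List.map (fun j : Nat => k * (j : Int)) (List.range m) := by
  rw [PySem.List.pyRange_of_pos 0 _ hk]
  have hcount : (if (0 : Int) < ((m * k.toNat : Nat) : Int)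
      then ((((m * k.toNat : Nat) : Int) - 0 + k - 1) / k).toNat else 0) = m := by
    by_cases hm : 0 < m
    · rw [if_pos (by exact_mod_cast Nat.mul_pos hm (by omega))]
      have h1 : (((m * k.toNat : Nat) : Int) - 0 + k - 1) / k = m := by
        have h2 : ((m * k.toNat : Nat) : Int) = (m : Int) * k := by
          push_cast
          rw [Int.toNat_of_nonneg hk.le]
        rw [h2, show (m : Int) * k - 0 + k - 1 = (k - 1) + (m : Int) * k by ring,
          Int.add_mul_ediv_right _ _ hk.ne',
          Int.ediv_eq_zero_of_lt (by omega) (by omega)]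
        omega
      rw [h1]
      omega
    · have hm0 : m = 0 := by omega
      subst hm0
      simp
  rw [hcount]
  exact List.map_congr_left (fun j _ => by rw [zero_add])

-- the padded list's length is a multiple of k when k > 0
theorem pvPad_dvd (k : Int) (hpos : 0 < k) (cs0 : List Char) :
    k.toNat ∣ (if PySem.Int.mod (cs0.length : Int) k ≠ 0 then
        cs0 ++ List.replicate (k - PySem.Int.mod (cs0.length : Int) k).toNat 'X'
      else cs0).length := by
  have hmod : PySem.Int.mod (cs0.length : Int) k = (cs0.length : Int) % k := by
    simp [PySem.Int.mod, Int.fmod_eq_emod, hpos.le]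
  by_cases hz : PySem.Int.mod (cs0.length : Int) k ≠ 0
  · rw [if_pos hz, hmod] at *
    rw [hmod] at hz
    have h0 : 0 ≤ (cs0.length : Int) % k := Int.emod_nonneg _ hpos.ne'
    have h1 : (cs0.length : Int) % k < k := Int.emod_lt_of_pos _ hpos
    have hlen : ((cs0 ++ List.replicate (k - (cs0.length : Int) % k).toNat 'X').length : Int)
        = (cs0.length : Int) + (k - (cs0.length : Int) % k) := by
      simp only [List.length_append, List.length_replicate]
      push_cast
      omega
    have hsum : (cs0.length : Int) + (k - (cs0.length : Int) % k)
        = k * ((cs0.length : Int) / k) + k := by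
      rw [Int.emod_def]
      ring
    rw [← Int.natCast_dvd_natCast, Int.toNat_of_nonneg hpos.le, hlen, hsum]
    exact ⟨(cs0.length : Int) / k + 1, by ring⟩
  · rw [if_neg hz]
    rw [ne_eq, not_not] at hz
    rw [hmod] at hz
    rw [← Int.natCast_dvd_natCast, Int.toNat_of_nonneg hpos.le]
    exact Int.dvd_of_emod_eq_zero hz

-- core equivalence over the (already padded) character list
theorem pv_main (k : Int) (hk : k ≠ 0) (cs : List Char)
    (hdvd : 0 < k → k.toNat ∣ cs.length) :
    (PySem.List.pyRange 0 (cs.length : Int) k).foldl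
      (fun lstl i =>
        lstl ++ [(PySem.List.slice cs (some i) (some (i + k))).map
                   (fun ch => (ch.toNat : Int) - 65)]) []
    = (cs.foldl
        (fun (st : List (List Int) × List Int) ch =>
          let cur := st.2 ++ [(ch.toNat : Int) - 65]
          if (cur.length : Int) = k then (st.1 ++ [cur], []) else (st.1, cur))
        ([], [])).1 := by
  have hBfold : cs.foldl
      (fun (st : List (List Int) × List Int) ch =>
        let cur := st.2 ++ [(ch.toNat : Int) - 65]
        if (cur.length : Int) = k then (st.1 ++ [cur], []) else (st.1, cur)) ([], [])
      = (cs.map pvConv).foldl (pvStep k) ([], []) := by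
    rw [List.foldl_map]
    rfl
  rw [hBfold]
  rcases lt_or_gt_of_ne hk with hneg | hpos
  · -- k < 0: A's range is empty, B's flush never fires
    have hA : PySem.List.pyRange 0 (cs.length : Int) k = [] := by
      unfold PySem.List.pyRange
      rw [if_neg hk, if_neg (by omega : ¬ (0 : Int) < k),
        if_neg (by omega : ¬ ((cs.length : Int)) < 0)]
      simp
    rw [hA, List.foldl_nil]
    exact (pvB_neg k hneg (cs.map pvConv) [] []).symm
  · -- k > 0
    obtain ⟨m, hm⟩ := hdvd hpos
    rw [Nat.mul_comm] at hm
    have hconv : ∀ i ∈ List.range m,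
        (PySem.List.slice cs (some (k * (i : Int))) (some (k * (i : Int) + k))).map
            (fun ch => (ch.toNat : Int) - 65)
          = ((cs.map pvConv).drop (k.toNat * i)).take k.toNat := by
      intro i _
      have ha : 0 ≤ k * (i : Int) := mul_nonneg hpos.le (Int.natCast_nonneg i)
      rw [PySem.List.slice_toNat cs ha (add_nonneg ha hpos.le)]
      have h1 : (k * (i : Int)).toNat = k.toNat * i := by
        rw [show k * (i : Int) = ((k.toNat * i : Nat) : Int) by
          push_cast
          rw [Int.toNat_of_nonneg hpos.le]]
        exact Int.toNat_natCast _
      have h2 : (k * (i : Int) + k).toNat - k.toNat * i = k.toNat := by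
        rw [← h1]
        omega
      rw [h1, h2, List.map_take, List.map_drop]
      rfl
    rw [PySem.List.foldl_append_singleton_eq_map, List.nil_append, hm,
      pvRange_chunks k hpos m, List.map_map]
    simp only [Function.comp_def]
    rw [List.map_congr_left (fun i hi => hconv i hi)]
    rw [pvChunk_of_map]
    rw [pvB_main k hpos m (cs.map pvConv) [] (by simp [hm])]
    simp

-- ===== VERDICT =====
theorem matrix_distributor_py_spec : Claim_equal_matrix_distributor_py := by
  intro text k _ hk
  unfold Spec_matrix_distributor_py matrix_distributor_py matrix_distributor_py_alt
  exact pv_main k hk _ (fun hpos => pvPad_dvd k hpos text.toList)
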